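-- pv_equiv track=rewrite | github.com/Cicada31113/david | 5-1/door_hacking06.py | expand_hotspot
-- ===== SOURCE A (Python) =====
-- import itertools
--
-- def expand_hotspot(mask, charset):
--     """핫스팟 마스크를 실제 암호 후보 리스트로 확장합니다."""
--     if '?' not in mask:
--         return [mask]
--
--     q_indices = [i for i, char in enumerate(mask) if char == '?']
--     num_q = len(q_indices)
--
--     candidates = []
--     for combo in itertools.product(charset, repeat=num_q):
--         temp_list = list(mask)
--         for i, char in zip(q_indices, combo):
--             temp_list[i] = char
--         candidates.append("".join(temp_list))
--     return candidates
-- ===== SOURCE B (Python) =====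
-- def expand_hotspot(mask, charset):
--     """핫스팟 마스크를 실제 암호 후보 리스트로 확장합니다."""
--     candidates = ['']
--     for char in mask:
--         if char == '?':
--             candidates = [c + ch for c in candidates for ch in charset]
--         else:
--             candidates = [c + char for c in candidates]
--     return candidates
-- ===== Notes on version B (the rewrite author's own statement) =====
-- stated objective: simpler
-- what changed: Replaces itertools.product over '?' positions plus per-combo list surgery (copy mask to a char list, overwrite each '?' slot, re-join) by a single left-to-right pass that grows partial candidates incrementally, crossing with charset at each '?'; no index bookkeeping and no special case for masks without '?'.
import Mathlib
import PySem

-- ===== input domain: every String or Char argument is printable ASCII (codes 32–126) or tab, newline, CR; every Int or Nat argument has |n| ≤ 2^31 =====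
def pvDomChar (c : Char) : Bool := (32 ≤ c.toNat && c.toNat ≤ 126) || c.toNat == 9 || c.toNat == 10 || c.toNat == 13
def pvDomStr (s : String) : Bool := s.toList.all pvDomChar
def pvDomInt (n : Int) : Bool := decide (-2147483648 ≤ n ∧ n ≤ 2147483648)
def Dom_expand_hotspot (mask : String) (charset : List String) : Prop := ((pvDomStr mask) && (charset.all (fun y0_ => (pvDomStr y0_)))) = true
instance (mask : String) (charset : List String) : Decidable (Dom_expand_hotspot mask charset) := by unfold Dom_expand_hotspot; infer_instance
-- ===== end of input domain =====

-- B replaces itertools.product plus per-combo index surgery by one left-to-right pass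
-- growing partial candidates (objective: simpler). Return-value equivalence; neither mutates its arguments.


-- ===== PORT A =====
-- itertools.product(xs, repeat=n): tuples in lexicographic order, first coordinate slowest.
def pyProduct {α : Type} (xs : List α) : Nat → List (List α)
  | 0 => [[]]
  | n + 1 => xs.flatMap (fun x => (pyProduct xs n).map (fun p => x :: p))

-- [i for i, char in enumerate(mask) if char == '?']  (indices are nonnegative, kept as Nat)
def qidxA (l : List Char) : List Nat :=
  ((PySem.List.enumerate l).filter (fun p => p.2 == '?')).map (fun p => p.1.toNat)

def expand_hotspot (mask : String) (charset : List String) : List String :=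
  if PySem.Str.isIn "?" mask = false then [mask]
  else
    let l := mask.toList
    let q_indices := qidxA l
    let num_q := q_indices.length
    (pyProduct (charset.map String.toList) num_q).map (fun combo =>
      String.ofList (PySem.Chars.join []
        ((q_indices.zip combo).foldl (fun t iv => t.set iv.1 iv.2) (l.map (fun c => [c])))))

-- ===== PORT B =====
def expand_hotspot_alt (mask : String) (charset : List String) : List String :=
  (mask.toList.foldl (fun cands c =>
      if c == '?' then cands.flatMap (fun p => charset.map (fun ch => p ++ ch.toList))
      else cands.map (fun p => p ++ [c])) [([] : List Char)]).map String.ofList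

-- ===== PRECONDITION & SPEC =====
def Spec_expand_hotspot (mask : String) (charset : List String) (out : List String) : Prop := out = expand_hotspot_alt mask charset
instance (mask : String) (charset : List String) (out : List String) : Decidable (Spec_expand_hotspot mask charset out) := by unfold Spec_expand_hotspot; infer_instance

-- ===== CLAIM (what is proved, stated in full; the proofs are below) =====
def Claim_equal_expand_hotspot : Prop := ∀ (mask : String) (charset : List String), Dom_expand_hotspot mask charset → Spec_expand_hotspot mask charset (expand_hotspot mask charset)

-- ===== LEMMAS AND PROOFS =====

-- suffix expansion: candidates for the remaining mask characters, rightmost '?' fastest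
def pvG (C : List (List Char)) : List Char → List (List Char)
  | [] => [[]]
  | c :: r => if c == '?' then C.flatMap (fun s => (pvG C r).map (fun t => s ++ t))
              else (pvG C r).map (fun t => c :: t)

theorem pvG_no_q (C : List (List Char)) (l : List Char) (h : '?' ∉ l) : pvG C l = [l] := by
  induction l with
  | nil => rfl
  | cons c r ih =>
    simp only [List.mem_cons, not_or] at h
    have hb : (c == '?') = false := by simp; exact fun hh => h.1 hh.symm
    simp [pvG, hb, ih h.2]

theorem b_fold (charset : List String) (l : List Char) (acc : List (List Char)) :
    l.foldl (fun cands c =>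
      if c == '?' then cands.flatMap (fun p => charset.map (fun ch => p ++ ch.toList))
      else cands.map (fun p => p ++ [c])) acc
    = acc.flatMap (fun p => (pvG (charset.map String.toList) l).map (fun t => p ++ t)) := by
  induction l generalizing acc with
  | nil => simp [pvG]
  | cons c r ih =>
    rw [List.foldl_cons]
    by_cases hc : c = '?'
    · rw [if_pos (by simp [hc]), ih]
      simp [pvG, hc, List.flatMap_assoc, List.map_flatMap, List.flatMap_map, List.map_map,
        Function.comp_def, List.append_assoc]
    · rw [if_neg (by simp [hc]), ih]
      simp [pvG, hc, List.flatMap_map, List.map_map, Function.comp_def]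

theorem alt_eq_G (mask : String) (charset : List String) :
    expand_hotspot_alt mask charset = (pvG (charset.map String.toList) mask.toList).map String.ofList := by
  unfold expand_hotspot_alt
  rw [b_fold]
  simp

theorem enumerate_shift {α : Type} (l : List α) (s : Int) :
    PySem.List.enumerate l (s + 1) = (PySem.List.enumerate l s).map (fun p => (p.1 + 1, p.2)) := by
  induction l generalizing s with
  | nil => simp [PySem.List.enumerate_nil]
  | cons a t ih => simp [PySem.List.enumerate_cons, ih]

theorem qidxA_cons (c : Char) (r : List Char) :
    qidxA (c :: r) = if c == '?' then 0 :: (qidxA r).map (· + 1) else (qidxA r).map (· + 1) := by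
  have key : (((PySem.List.enumerate r 0).map (fun p => (p.1 + 1, p.2))).filter
        (fun p => p.2 == '?')).map (fun p => p.1.toNat)
      = (((PySem.List.enumerate r 0).filter (fun p => p.2 == '?')).map (fun p => p.1.toNat)).map
          (· + 1) := by
    rw [List.filter_map, List.map_map, List.map_map]
    refine List.map_congr_left (fun p hp => ?_)
    have hm := (List.mem_filter.mp hp).1
    rw [PySem.List.mem_enumerate_iff] at hm
    rcases hm with ⟨k, hk, rfl⟩
    simp
  unfold qidxA
  rw [PySem.List.enumerate_cons, List.filter_cons]
  by_cases hc : c = '?'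
  · simp only [hc, beq_self_eq_true, if_true, List.map_cons, Int.toNat_zero]
    rw [enumerate_shift, key]
  · simp only [beq_iff_eq, hc, if_false]
    rw [enumerate_shift, key]

theorem set_shift (pairs : List (Nat × List Char)) (a : List Char) (tl : List (List Char)) :
    (pairs.map (Prod.map (· + 1) id)).foldl (fun t iv => t.set iv.1 iv.2) (a :: tl)
    = a :: pairs.foldl (fun t iv => t.set iv.1 iv.2) tl := by
  induction pairs generalizing tl with
  | nil => rfl
  | cons p ps ih => simp [Prod.map, List.set, ih]

theorem join_nil_cons (a : List Char) (rest : List (List Char)) :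
    PySem.Chars.join [] (a :: rest) = a ++ PySem.Chars.join [] rest := by
  cases rest with
  | nil => simp [PySem.Chars.join_singleton, PySem.Chars.join_nil]
  | cons b r => simp [PySem.Chars.join_cons_cons]

theorem a_eq_G (charset : List String) (l : List Char) :
    (pyProduct (charset.map String.toList) (qidxA l).length).map (fun combo =>
      PySem.Chars.join []
        (((qidxA l).zip combo).foldl (fun t iv => t.set iv.1 iv.2) (l.map (fun c => [c]))))
    = pvG (charset.map String.toList) l := by
  induction l with
  | nil => simp [qidxA, pyProduct, PySem.List.enumerate_nil, pvG, PySem.Chars.join_nil]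
  | cons c r ih =>
    rw [qidxA_cons]
    by_cases hc : c = '?'
    · simp only [hc, beq_self_eq_true, if_true, List.length_cons, List.length_map, pvG, pyProduct]
      rw [List.map_flatMap]
      refine List.flatMap_congr (fun s hs => ?_)
      rw [← ih, List.map_map, List.map_map]
      refine List.map_congr_left (fun combo _ => ?_)
      simp only [Function.comp_apply, List.map_cons, List.zip_cons_cons, List.foldl_cons,
        List.set_cons_zero, List.zip_map_left]
      rw [set_shift, join_nil_cons]
    · simp only [beq_iff_eq, hc, if_false, pvG, List.length_map]
      rw [← ih, List.map_map]
      refine List.map_congr_left (fun combo _ => ?_)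
      simp only [Function.comp_apply, List.map_cons, List.zip_map_left]
      rw [set_shift, join_nil_cons, List.singleton_append]

theorem mem_q_iff (mask : String) : PySem.Str.isIn "?" mask = false ↔ '?' ∉ mask.toList := by
  rw [← Bool.not_eq_true, PySem.Str.isIn_iff_infix]
  have : (String.toList "?") = ['?'] := rfl
  rw [this, List.singleton_infix_iff]

-- ===== VERDICT (by name: the statement is the Claim_ definition above) =====
theorem expand_hotspot_spec : Claim_equal_expand_hotspot := by
  intro mask charset _
  unfold Spec_expand_hotspot
  rw [alt_eq_G]
  unfold expand_hotspot
  by_cases h : PySem.Str.isIn "?" mask = false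
  · rw [if_pos h, pvG_no_q _ _ ((mem_q_iff mask).mp h)]
    simp [String.ofList_toList]
  · rw [if_neg h]
    simp only []
    rw [show (fun combo => String.ofList (PySem.Chars.join []
        (((qidxA mask.toList).zip combo).foldl (fun t iv => t.set iv.1 iv.2) (mask.toList.map (fun c => [c])))))
      = String.ofList ∘ (fun combo => PySem.Chars.join []
        (((qidxA mask.toList).zip combo).foldl (fun t iv => t.set iv.1 iv.2) (mask.toList.map (fun c => [c])))) from rfl]
    rw [← List.map_map, a_eq_G]
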